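-- pv_equiv track=rewrite | github.com/briannamcdonald/advent-of-code-2020 | day11/day11_part2.py | update_seats
-- ===== SOURCE A (Python) =====
-- def find_visible(dir, current_data, row, col):
--     current_val = "."
--     while current_val == ".":
--         if dir == "up":
--             row -= 1
--         elif dir == "down":
--             row += 1
--         elif dir == "left":
--             col -= 1
--         elif dir == "right":
--             col += 1
--         elif dir == "up-left":
--             row -= 1
--             col -= 1
--         elif dir == "up-right":
--             row -= 1
--             col += 1
--         elif dir == "down-left":
--             row += 1
--             col -= 1
--         elif dir == "down-right":
--             row += 1
--             col += 1
--         if (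
--             row < 0
--             or row >= len(current_data)
--             or col < 0
--             or col >= len(current_data[row])
--         ):
--             break
--         current_val = current_data[row][col]
--     if current_val == "#":
--         return 1
--     else:
--         return 0
--
-- def update_seats(current_data):
--     new_data = list(current_data)
--
--     for i in range(0, len(current_data)):
--         for j in range(0, len(current_data[i])):
--             if current_data[i][j] == ".":
--                 continue
--             occupied = 0
--             occupied += find_visible("up", current_data, i, j)
--             occupied += find_visible("down", current_data, i, j)
--             occupied += find_visible("left", current_data, i, j)
--             occupied += find_visible("right", current_data, i, j)
--             occupied += find_visible("up-left", current_data, i, j)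
--             occupied += find_visible("up-right", current_data, i, j)
--             occupied += find_visible("down-left", current_data, i, j)
--             occupied += find_visible("down-right", current_data, i, j)
--
--             if current_data[i][j] == "L" and occupied == 0:
--                 new_data[i] = new_data[i][:j] + "#" + new_data[i][j + 1 :]
--             if current_data[i][j] == "#" and occupied >= 5:
--                 new_data[i] = new_data[i][:j] + "L" + new_data[i][j + 1 :]
--     return new_data
-- ===== SOURCE B (Python) =====
-- def update_seats(current_data):
--     rows = [list(r) for r in current_data]
--
--     def sweep_up(rs, dc):
--         # tables[i][j] = first non-'.' char seen walking up (row -1 each step,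
--         # col +dc each step) from (i, j), or '.' if the ray leaves the grid.
--         tables = []
--         prev_row = None
--         prev_tab = None
--         for r in rs:
--             tab = []
--             for j in range(len(r)):
--                 k = j + dc
--                 if prev_row is None or k < 0 or k >= len(prev_row):
--                     tab.append('.')
--                 elif prev_row[k] != '.':
--                     tab.append(prev_row[k])
--                 else:
--                     tab.append(prev_tab[k])
--             tables.append(tab)
--             prev_row = r
--             prev_tab = tab
--         return tables
--
--     def sweep_left(r):
--         tab = []
--         for j in range(len(r)):
--             if j == 0:
--                 tab.append('.')
--             elif r[j - 1] != '.':
--                 tab.append(r[j - 1])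
--             else:
--                 tab.append(tab[j - 1])
--         return tab
--
--     def sweep_down(rs, dc):
--         return list(reversed(sweep_up(list(reversed(rs)), dc)))
--
--     up = sweep_up(rows, 0)
--     ul = sweep_up(rows, -1)
--     ur = sweep_up(rows, 1)
--     down = sweep_down(rows, 0)
--     dl = sweep_down(rows, -1)
--     dr = sweep_down(rows, 1)
--     left = [sweep_left(r) for r in rows]
--     right = [list(reversed(sweep_left(list(reversed(r))))) for r in rows]
--
--     out = []
--     for i in range(len(rows)):
--         new_row = []
--         for j in range(len(rows[i])):
--             c = rows[i][j]
--             if c == ".":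
--                 new_row.append(c)
--                 continue
--             occ = [up[i][j], down[i][j], left[i][j], right[i][j],
--                    ul[i][j], ur[i][j], dl[i][j], dr[i][j]].count("#")
--             if c == "L" and occ == 0:
--                 new_row.append("#")
--             elif c == "#" and occ >= 5:
--                 new_row.append("L")
--             else:
--                 new_row.append(c)
--         out.append("".join(new_row))
--     return out
-- ===== Notes on version B (the rewrite author's own statement) =====
-- stated objective: alternative
-- what changed: A re-walks a ray across the grid for each of the 8 directions at every seat; B instead precomputes the first visible non-floor character in each of the 8 directions for every cell with linear DP sweeps (each cell reads only its neighbour's table entry), then decides each seat by O(1) table lookups.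
import Mathlib
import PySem

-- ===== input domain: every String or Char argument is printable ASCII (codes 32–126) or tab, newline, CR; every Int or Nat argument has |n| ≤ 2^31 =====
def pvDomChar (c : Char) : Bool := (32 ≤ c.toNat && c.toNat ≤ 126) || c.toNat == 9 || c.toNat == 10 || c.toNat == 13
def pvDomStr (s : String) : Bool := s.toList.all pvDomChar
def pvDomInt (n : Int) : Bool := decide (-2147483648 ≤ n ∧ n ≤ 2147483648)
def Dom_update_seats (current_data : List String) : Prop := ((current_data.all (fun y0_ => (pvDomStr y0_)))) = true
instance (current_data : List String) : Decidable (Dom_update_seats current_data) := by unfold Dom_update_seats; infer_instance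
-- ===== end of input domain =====

-- B replaces A's per-seat directional ray walks by eight precomputed DP sweep tables
-- (an alternative algorithm; return value proved identical on every input).
-- ===== PORT A =====
-- Strings are ported through List Char (String.toList / String.ofList): the per-character
-- indexing, slicing and concatenation A performs are exact on lists of characters.
-- fvFuel is the totality guard for A's while loop (the walk leaves the grid after at
-- most rows + max-row-length steps); it does not change the computed value.
def fvFuel (cd : List (List Char)) : Nat :=
  cd.length + cd.foldr (fun r m => max r.length m) 0 + 2

def fvLoop : Nat → String → List (List Char) → Int → Int → Char → Char
  | 0, _, _, _, _, cv => cv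
  | fuel+1, dir, cd, row, col, cv =>
    if cv = '.' then
      let rc : Int × Int :=
        if dir = "up" then (row - 1, col)
        else if dir = "down" then (row + 1, col)
        else if dir = "left" then (row, col - 1)
        else if dir = "right" then (row, col + 1)
        else if dir = "up-left" then (row - 1, col - 1)
        else if dir = "up-right" then (row - 1, col + 1)
        else if dir = "down-left" then (row + 1, col - 1)
        else if dir = "down-right" then (row + 1, col + 1)
        else (row, col)
      let row := rc.1
      let col := rc.2
      if row < 0 ∨ (cd.length : Int) ≤ row ∨ col < 0 ∨
          ((PySem.List.pyGetD cd row []).length : Int) ≤ col then cv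
      else fvLoop fuel dir cd row col (PySem.List.pyGetD (PySem.List.pyGetD cd row []) col ' ')
    else cv

def find_visible (dir : String) (current_data : List (List Char)) (row col : Int) : Int :=
  if fvLoop (fvFuel current_data) dir current_data row col '.' = '#' then 1 else 0

def update_seats (current_data : List String) : List String :=
  let cd := current_data.map String.toList
  let new_data := cd
  let new_data :=
    (PySem.List.pyRange 0 (cd.length : Int) 1).foldl (fun nd i =>
      (PySem.List.pyRange 0 (((PySem.List.pyGetD cd i []).length : Int)) 1).foldl (fun nd j =>
        let c := PySem.List.pyGetD (PySem.List.pyGetD cd i []) j ' '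
        if c = '.' then nd
        else
          let occupied : Int :=
            find_visible "up" cd i j + find_visible "down" cd i j +
            find_visible "left" cd i j + find_visible "right" cd i j +
            find_visible "up-left" cd i j + find_visible "up-right" cd i j +
            find_visible "down-left" cd i j + find_visible "down-right" cd i j
          let nd :=
            if c = 'L' ∧ occupied = 0 then
              PySem.List.pySetD nd i
                (PySem.List.slice (PySem.List.pyGetD nd i []) none (some j) ++ ['#'] ++
                 PySem.List.slice (PySem.List.pyGetD nd i []) (some (j + 1)) none)
            else nd
          if c = '#' ∧ 5 ≤ occupied then
            PySem.List.pySetD nd i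
              (PySem.List.slice (PySem.List.pyGetD nd i []) none (some j) ++ ['L'] ++
               PySem.List.slice (PySem.List.pyGetD nd i []) (some (j + 1)) none)
          else nd) nd) new_data
  new_data.map (fun r => String.ofList r)


-- ===== PORT B =====
-- B precomputes, by linear sweeps, the first visible (non-'.') character in each of
-- the 8 directions for every cell, then decides each cell by table lookup.
def mkUpTab (prev : Option (List Char × List Char)) (dc : Int) (r : List Char) : List Char :=
  (PySem.List.pyRange 0 (r.length : Int) 1).foldl (fun tab j =>
    let k := j + dc
    tab ++ [match prev with
            | none => '.'
            | some (pr, pt) =>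
              if k < 0 ∨ (pr.length : Int) ≤ k then '.'
              else if PySem.List.pyGetD pr k ' ' ≠ '.' then PySem.List.pyGetD pr k ' '
              else PySem.List.pyGetD pt k ' ']) []

def sweepUp (rs : List (List Char)) (dc : Int) : List (List Char) :=
  (rs.foldl (fun st r =>
      let tab := mkUpTab st.2 dc r
      (st.1 ++ [tab], some (r, tab)))
    (([], none) : List (List Char) × Option (List Char × List Char))).1

def sweepDown (rs : List (List Char)) (dc : Int) : List (List Char) :=
  (sweepUp rs.reverse dc).reverse

def sweepLeft (r : List Char) : List Char :=
  (PySem.List.pyRange 0 (r.length : Int) 1).foldl (fun tab j =>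
    tab ++ [if j = 0 then '.'
            else if PySem.List.pyGetD r (j - 1) ' ' ≠ '.' then PySem.List.pyGetD r (j - 1) ' '
            else PySem.List.pyGetD tab (j - 1) ' ']) []

def update_seats_alt (current_data : List String) : List String :=
  let rows := current_data.map String.toList
  let up := sweepUp rows 0
  let ul := sweepUp rows (-1)
  let ur := sweepUp rows 1
  let down := sweepDown rows 0
  let dl := sweepDown rows (-1)
  let dr := sweepDown rows 1
  let left := rows.map sweepLeft
  let right := rows.map (fun r => (sweepLeft r.reverse).reverse)
  (PySem.List.pyRange 0 (rows.length : Int) 1).foldl (fun out i =>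
    let newRow :=
      (PySem.List.pyRange 0 (((PySem.List.pyGetD rows i []).length : Int)) 1).foldl (fun nr j =>
        nr ++ [
          let c := PySem.List.pyGetD (PySem.List.pyGetD rows i []) j ' '
          if c = '.' then c
          else
            let occ := ([PySem.List.pyGetD (PySem.List.pyGetD up i []) j ' ',
                         PySem.List.pyGetD (PySem.List.pyGetD down i []) j ' ',
                         PySem.List.pyGetD (PySem.List.pyGetD left i []) j ' ',
                         PySem.List.pyGetD (PySem.List.pyGetD right i []) j ' ',
                         PySem.List.pyGetD (PySem.List.pyGetD ul i []) j ' ',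
                         PySem.List.pyGetD (PySem.List.pyGetD ur i []) j ' ',
                         PySem.List.pyGetD (PySem.List.pyGetD dl i []) j ' ',
                         PySem.List.pyGetD (PySem.List.pyGetD dr i []) j ' ']).count '#'
            if c = 'L' ∧ occ = 0 then '#'
            else if c = '#' ∧ 5 ≤ occ then 'L'
            else c]) []
    out ++ [String.ofList newRow]) []

-- ===== PRECONDITION & SPEC =====
def Spec_update_seats (current_data : List String) (out : List String) : Prop := out = update_seats_alt current_data
instance (current_data : List String) (out : List String) : Decidable (Spec_update_seats current_data out) := by unfold Spec_update_seats; infer_instance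

-- ===== CLAIM (what is proved, stated in full; the proofs are below) =====
def Claim_equal_update_seats : Prop := ∀ (current_data : List String), Dom_update_seats current_data → Spec_update_seats current_data (update_seats current_data)

-- ===== LEMMAS AND PROOFS =====


-- ===== LEMMAS AND PROOFS =====

-- Direction-generic form of A's while loop (dir replaced by the step vector).
def rayLoop : Nat → List (List Char) → Int → Int → Int → Int → Char → Char
  | 0, _, _, _, _, _, cv => cv
  | fuel+1, cd, dr, dc, row, col, cv =>
    if cv = '.' then
      let row := row + dr
      let col := col + dc
      if row < 0 ∨ (cd.length : Int) ≤ row ∨ col < 0 ∨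
          ((PySem.List.pyGetD cd row []).length : Int) ≤ col then cv
      else rayLoop fuel cd dr dc row col (PySem.List.pyGetD (PySem.List.pyGetD cd row []) col ' ')
    else cv

lemma rayLoop_stop (f : Nat) (cd : List (List Char)) (dr dc row col : Int) (cv : Char)
    (h : cv ≠ '.') : rayLoop f cd dr dc row col cv = cv := by
  cases f <;> simp [rayLoop, h]

lemma rayLoop_succ (f : Nat) (cd : List (List Char)) (dr dc row col : Int) :
    rayLoop (f+1) cd dr dc row col '.' =
      (if row + dr < 0 ∨ (cd.length : Int) ≤ row + dr ∨ col + dc < 0 ∨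
          ((PySem.List.pyGetD cd (row + dr) []).length : Int) ≤ col + dc
       then '.'
       else rayLoop f cd dr dc (row + dr) (col + dc)
              (PySem.List.pyGetD (PySem.List.pyGetD cd (row + dr) []) (col + dc) ' ')) := by
  simp [rayLoop]

lemma fvLoop_up (f : Nat) (cd : List (List Char)) (r c : Int) (cv : Char) :
    fvLoop f "up" cd r c cv = rayLoop f cd (-1) 0 r c cv := by
  induction f generalizing r c cv with
  | zero => rfl
  | succ f ih => simp [fvLoop, rayLoop, ih, sub_eq_add_neg]

lemma fvLoop_down (f : Nat) (cd : List (List Char)) (r c : Int) (cv : Char) :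
    fvLoop f "down" cd r c cv = rayLoop f cd 1 0 r c cv := by
  induction f generalizing r c cv with
  | zero => rfl
  | succ f ih => simp [fvLoop, rayLoop, ih]

lemma fvLoop_left (f : Nat) (cd : List (List Char)) (r c : Int) (cv : Char) :
    fvLoop f "left" cd r c cv = rayLoop f cd 0 (-1) r c cv := by
  induction f generalizing r c cv with
  | zero => rfl
  | succ f ih => simp [fvLoop, rayLoop, ih, sub_eq_add_neg]

lemma fvLoop_right (f : Nat) (cd : List (List Char)) (r c : Int) (cv : Char) :
    fvLoop f "right" cd r c cv = rayLoop f cd 0 1 r c cv := by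
  induction f generalizing r c cv with
  | zero => rfl
  | succ f ih => simp [fvLoop, rayLoop, ih]

lemma fvLoop_ul (f : Nat) (cd : List (List Char)) (r c : Int) (cv : Char) :
    fvLoop f "up-left" cd r c cv = rayLoop f cd (-1) (-1) r c cv := by
  induction f generalizing r c cv with
  | zero => rfl
  | succ f ih => simp [fvLoop, rayLoop, ih, sub_eq_add_neg]

lemma fvLoop_ur (f : Nat) (cd : List (List Char)) (r c : Int) (cv : Char) :
    fvLoop f "up-right" cd r c cv = rayLoop f cd (-1) 1 r c cv := by
  induction f generalizing r c cv with
  | zero => rfl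
  | succ f ih => simp [fvLoop, rayLoop, ih, sub_eq_add_neg]

lemma fvLoop_dl (f : Nat) (cd : List (List Char)) (r c : Int) (cv : Char) :
    fvLoop f "down-left" cd r c cv = rayLoop f cd 1 (-1) r c cv := by
  induction f generalizing r c cv with
  | zero => rfl
  | succ f ih => simp [fvLoop, rayLoop, ih, sub_eq_add_neg]

lemma fvLoop_dr (f : Nat) (cd : List (List Char)) (r c : Int) (cv : Char) :
    fvLoop f "down-right" cd r c cv = rayLoop f cd 1 1 r c cv := by
  induction f generalizing r c cv with
  | zero => rfl
  | succ f ih => simp [fvLoop, rayLoop, ih]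

-- First visible character looking upward (row −1 per step, column +dc per step).
def visUp (cd : List (List Char)) (dc : Int) : Nat → Int → Char
  | 0, _ => '.'
  | i+1, j =>
    let k := j + dc
    let pr := cd.getD i []
    if k < 0 ∨ (pr.length : Int) ≤ k then '.'
    else if PySem.List.pyGetD pr k ' ' ≠ '.' then PySem.List.pyGetD pr k ' '
    else visUp cd dc i k

lemma visUp_succ (cd : List (List Char)) (dc : Int) (i : Nat) (j : Int) :
    visUp cd dc (i+1) j =
      (if j + dc < 0 ∨ ((cd.getD i []).length : Int) ≤ j + dc then '.'
       else if PySem.List.pyGetD (cd.getD i []) (j + dc) ' ' ≠ '.' then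
         PySem.List.pyGetD (cd.getD i []) (j + dc) ' '
       else visUp cd dc i (j + dc)) := by
  simp [visUp]

-- First visible character looking left inside one row.
def visL (r : List Char) : Nat → Char
  | 0 => '.'
  | j+1 =>
    if (r.length : Int) ≤ (j : Int) then '.'
    else if PySem.List.pyGetD r (j : Int) ' ' ≠ '.' then PySem.List.pyGetD r (j : Int) ' '
    else visL r j

lemma visL_succ (r : List Char) (j : Nat) :
    visL r (j+1) =
      (if (r.length : Int) ≤ (j : Int) then '.'
       else if PySem.List.pyGetD r (j : Int) ' ' ≠ '.' then PySem.List.pyGetD r (j : Int) ' '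
       else visL r j) := by
  simp [visL]

-- First visible character looking right inside one row.
def visR (r : List Char) (j : Nat) : Char :=
  if h : j + 1 < r.length then
    (if PySem.List.pyGetD r ((j : Int) + 1) ' ' ≠ '.' then PySem.List.pyGetD r ((j : Int) + 1) ' '
     else visR r (j + 1))
  else '.'
termination_by r.length - j
decreasing_by omega

lemma ray_up_eq_visUp (cd : List (List Char)) (dc : Int) :
    ∀ (i : Nat) (f : Nat) (j : Int), i < cd.length → 0 ≤ j → i + 1 ≤ f →
      rayLoop f cd (-1) dc (i : Int) j '.' = visUp cd dc i j := by
  intro i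
  induction i with
  | zero =>
    intro f j _ _ hf
    obtain ⟨f', rfl⟩ : ∃ f', f = f' + 1 := ⟨f - 1, by omega⟩
    rw [rayLoop_succ, if_pos (by left; omega)]
    rfl
  | succ i ih =>
    intro f j hi hj hf
    obtain ⟨f', rfl⟩ : ∃ f', f = f' + 1 := ⟨f - 1, by omega⟩
    rw [rayLoop_succ, visUp_succ]
    have hrow : ((i + 1 : Nat) : Int) + (-1) = (i : Int) := by push_cast; ring
    rw [hrow, PySem.List.pyGetD_natCast]
    by_cases hcol : j + dc < 0 ∨ ((cd.getD i []).length : Int) ≤ j + dc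
    · rw [if_pos (by rcases hcol with h | h; · right; right; left; omega
                     · right; right; right; omega), if_pos hcol]
    · rw [if_neg (by push Not at hcol ⊢; refine ⟨by omega, by omega, hcol.1, hcol.2⟩),
          if_neg hcol]
      by_cases hch : PySem.List.pyGetD (cd.getD i []) (j + dc) ' ' = '.'
      · rw [if_neg (by simpa using hch), hch]
        exact ih f' (j + dc) (by omega) (by omega) (by omega)
      · rw [if_pos (by simpa using hch)]
        exact rayLoop_stop _ _ _ _ _ _ _ hch

lemma ray_rev (cd : List (List Char)) (dc : Int) :
    ∀ (f : Nat) (i j : Int) (cv : Char),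
      rayLoop f cd 1 dc i j cv = rayLoop f cd.reverse (-1) dc ((cd.length : Int) - 1 - i) j cv := by
  intro f
  induction f with
  | zero => intro i j cv; rfl
  | succ f ih =>
    intro i j cv
    by_cases hcv : cv = '.'
    case neg => rw [rayLoop_stop _ _ _ _ _ _ _ hcv, rayLoop_stop _ _ _ _ _ _ _ hcv]
    subst hcv
    rw [rayLoop_succ, rayLoop_succ]
    have hlen : (cd.reverse.length : Int) = (cd.length : Int) := by simp
    by_cases hrow : i + 1 < 0 ∨ (cd.length : Int) ≤ i + 1
    · have hL : i + 1 < 0 ∨ (cd.length : Int) ≤ i + 1 ∨ j + dc < 0 ∨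
          ((PySem.List.pyGetD cd (i + 1) []).length : Int) ≤ j + dc := by
        rcases hrow with h | h
        · exact Or.inl h
        · exact Or.inr (Or.inl h)
      have hR : (cd.length : Int) - 1 - i + -1 < 0 ∨
          (cd.reverse.length : Int) ≤ (cd.length : Int) - 1 - i + -1 ∨ j + dc < 0 ∨
          ((PySem.List.pyGetD cd.reverse ((cd.length : Int) - 1 - i + -1) []).length : Int) ≤ j + dc := by
        rcases hrow with h | h
        · refine Or.inr (Or.inl ?_)
          rw [hlen]
          omega
        · exact Or.inl (by omega)
      rw [if_pos hL, if_pos hR]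
    · push Not at hrow
      have hget : PySem.List.pyGetD cd.reverse ((cd.length : Int) - 1 - i + -1) [] =
          PySem.List.pyGetD cd (i + 1) [] := by
        rw [PySem.List.pyGetD_eq_getElem _ _ (by omega) (by rw [← hlen]; simp; omega),
            PySem.List.pyGetD_eq_getElem _ _ (by omega) (by omega)]
        rw [List.getElem_reverse]
        congr 1
        omega
      by_cases hcol : j + dc < 0 ∨ ((PySem.List.pyGetD cd (i + 1) []).length : Int) ≤ j + dc
      · have hL : i + 1 < 0 ∨ (cd.length : Int) ≤ i + 1 ∨ j + dc < 0 ∨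
            ((PySem.List.pyGetD cd (i + 1) []).length : Int) ≤ j + dc := by
          rcases hcol with h | h
          · exact Or.inr (Or.inr (Or.inl h))
          · exact Or.inr (Or.inr (Or.inr h))
        have hR : (cd.length : Int) - 1 - i + -1 < 0 ∨
            (cd.reverse.length : Int) ≤ (cd.length : Int) - 1 - i + -1 ∨ j + dc < 0 ∨
            ((PySem.List.pyGetD cd.reverse ((cd.length : Int) - 1 - i + -1) []).length : Int) ≤ j + dc := by
          rw [hget]
          rcases hcol with h | h
          · exact Or.inr (Or.inr (Or.inl h))
          · exact Or.inr (Or.inr (Or.inr h))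
        rw [if_pos hL, if_pos hR]
      · push Not at hcol
        have hL : ¬ (i + 1 < 0 ∨ (cd.length : Int) ≤ i + 1 ∨ j + dc < 0 ∨
            ((PySem.List.pyGetD cd (i + 1) []).length : Int) ≤ j + dc) := by
          simp only [not_or, not_lt, not_le]
          exact ⟨by omega, by omega, hcol.1, hcol.2⟩
        have hR : ¬ ((cd.length : Int) - 1 - i + -1 < 0 ∨
            (cd.reverse.length : Int) ≤ (cd.length : Int) - 1 - i + -1 ∨ j + dc < 0 ∨
            ((PySem.List.pyGetD cd.reverse ((cd.length : Int) - 1 - i + -1) []).length : Int) ≤ j + dc) := by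
          rw [hget, hlen]
          simp only [not_or, not_lt, not_le]
          exact ⟨by omega, by omega, hcol.1, hcol.2⟩
        rw [if_neg hL, if_neg hR, hget, ih (i + 1) (j + dc)]
        congr 1
        omega

lemma ray_left_eq_visL (cd : List (List Char)) :
    ∀ (j : Nat) (f : Nat) (i : Nat), i < cd.length → j + 1 ≤ f →
      rayLoop f cd 0 (-1) (i : Int) (j : Int) '.' = visL (cd.getD i []) j := by
  intro j
  induction j with
  | zero =>
    intro f i hi hf
    obtain ⟨f', rfl⟩ : ∃ f', f = f' + 1 := ⟨f - 1, by omega⟩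
    rw [rayLoop_succ, if_pos (by right; right; left; omega)]
    rfl
  | succ j ih =>
    intro f i hi hf
    obtain ⟨f', rfl⟩ : ∃ f', f = f' + 1 := ⟨f - 1, by omega⟩
    rw [rayLoop_succ, visL_succ]
    have hcol : ((j + 1 : Nat) : Int) + (-1) = (j : Int) := by push_cast; ring
    rw [hcol, add_zero, PySem.List.pyGetD_natCast]
    by_cases hc : ((cd.getD i []).length : Int) ≤ (j : Int)
    · rw [if_pos (by right; right; right; omega), if_pos hc]
    · rw [if_neg (by push Not at hc ⊢; refine ⟨by omega, by omega, by omega, hc⟩), if_neg hc]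
      by_cases hch : PySem.List.pyGetD (cd.getD i []) (j : Int) ' ' = '.'
      · rw [if_neg (by simpa using hch), hch]
        exact ih f' i hi (by omega)
      · rw [if_pos (by simpa using hch)]
        exact rayLoop_stop _ _ _ _ _ _ _ hch

lemma ray_right_eq_visR (cd : List (List Char)) :
    ∀ (f : Nat) (j : Nat) (i : Nat), i < cd.length → j < (cd.getD i []).length →
      (cd.getD i []).length - j ≤ f →
      rayLoop f cd 0 1 (i : Int) (j : Int) '.' = visR (cd.getD i []) j := by
  intro f
  induction f with
  | zero => intro j i hi hj hf; omega
  | succ f ih =>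
    intro j i hi hj hf
    rw [visR, rayLoop_succ, add_zero, PySem.List.pyGetD_natCast]
    have hcast : ((j : Int) + 1) = ((j + 1 : Nat) : Int) := by push_cast; ring
    rw [hcast, PySem.List.pyGetD_natCast]
    by_cases hc : j + 1 < (cd.getD i []).length
    · rw [dif_pos hc,
          if_neg (by simp only [not_or, not_lt, not_le]
                     refine ⟨by omega, by omega, by omega, by omega⟩)]
      by_cases hch : (cd.getD i []).getD (j + 1) ' ' = '.'
      · rw [if_neg (by simpa using hch), hch]
        exact ih (j + 1) i hi hc (by omega)
      · rw [if_pos (by simpa using hch)]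
        exact rayLoop_stop _ _ _ _ _ _ _ hch
    · rw [dif_neg hc, if_pos (by right; right; right; omega)]

lemma getD_rev {α : Type} (l : List α) (d : α) (m : Nat) (h : m < l.length) :
    l.reverse.getD m d = l.getD (l.length - 1 - m) d := by
  rw [List.getD_eq_getElem l.reverse d (by simpa using h),
      List.getD_eq_getElem l d (by omega), List.getElem_reverse]

lemma visR_eq_visL_rev (r : List Char) :
    ∀ (k j : Nat), j < r.length → r.length - j = k + 1 →
      visR r j = visL r.reverse (r.length - 1 - j) := by
  intro k
  induction k with
  | zero =>
    intro j hj hk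
    have hj1 : j = r.length - 1 := by omega
    rw [visR, dif_neg (by omega)]
    subst hj1
    have h0 : r.length - 1 - (r.length - 1) = 0 := by omega
    rw [h0]
    rfl
  | succ k ih =>
    intro j hj hk
    have hlt : j + 1 < r.length := by omega
    rw [visR, dif_pos hlt]
    have hm : r.length - 1 - j = (r.length - 2 - j) + 1 := by omega
    rw [hm, visL_succ]
    have hcond : ¬ ((r.reverse.length : Int) ≤ ((r.length - 2 - j : Nat) : Int)) := by
      rw [List.length_reverse]
      exact_mod_cast (by omega : ¬ (r.length ≤ r.length - 2 - j))
    rw [if_neg hcond]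
    have hrev : PySem.List.pyGetD r.reverse ((r.length - 2 - j : Nat) : Int) ' ' =
        PySem.List.pyGetD r ((j + 1 : Nat) : Int) ' ' := by
      rw [PySem.List.pyGetD_natCast, PySem.List.pyGetD_natCast,
          getD_rev r ' ' (r.length - 2 - j) (by omega)]
      congr 1
      omega
    have hcast : ((j : Int) + 1) = ((j + 1 : Nat) : Int) := by push_cast; ring
    rw [hrev, hcast]
    by_cases hch : PySem.List.pyGetD r ((j + 1 : Nat) : Int) ' ' = '.'
    · rw [if_neg (by simpa using hch), if_neg (by simpa using hch)]
      have := ih (j + 1) hlt (by omega)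
      rw [this]
      congr 1
      omega
    · rw [if_pos (by simpa using hch), if_pos (by simpa using hch)]

-- ===== B-side: the sweeps compute the vis functions =====

def goUp (dc : Int) : Option (List Char × List Char) → List (List Char) → List (List Char)
  | _, [] => []
  | prev, r :: rs =>
    let tab := mkUpTab prev dc r
    tab :: goUp dc (some (r, tab)) rs

lemma sweepUp_eq_goUp (dc : Int) :
    ∀ (rs : List (List Char)) (acc : List (List Char)) (prev : Option (List Char × List Char)),
      (rs.foldl (fun st r =>
          let tab := mkUpTab st.2 dc r
          (st.1 ++ [tab], some (r, tab))) (acc, prev)).1 = acc ++ goUp dc prev rs := by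
  intro rs
  induction rs with
  | nil => intro acc prev; simp [goUp]
  | cons r rs ih =>
    intro acc prev
    simp only [List.foldl_cons, goUp]
    rw [ih]
    simp

lemma mkUpTab_eq_map (prev : Option (List Char × List Char)) (dc : Int) (r : List Char) :
    mkUpTab prev dc r = (List.range r.length).map (fun (j : Nat) =>
      match prev with
      | none => '.'
      | some (pr, pt) =>
        if (j : Int) + dc < 0 ∨ (pr.length : Int) ≤ (j : Int) + dc then '.'
        else if PySem.List.pyGetD pr ((j : Int) + dc) ' ' ≠ '.' then PySem.List.pyGetD pr ((j : Int) + dc) ' '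
        else PySem.List.pyGetD pt ((j : Int) + dc) ' ') := by
  unfold mkUpTab
  rw [PySem.List.foldl_append_singleton_eq_map, PySem.List.pyRange_one]
  simp

def PrevOK (cd : List (List Char)) (dc : Int) (p : Nat) (prev : Option (List Char × List Char)) : Prop :=
  (p = 0 ∧ prev = none) ∨
  (0 < p ∧ ∃ pt, prev = some (cd.getD (p - 1) [], pt) ∧
    ∀ k : Int, 0 ≤ k → k < ((cd.getD (p - 1) []).length : Int) →
      PySem.List.pyGetD pt k ' ' = visUp cd dc (p - 1) k)

lemma mkUpTab_entry (cd : List (List Char)) (dc : Int) (p : Nat)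
    (prev : Option (List Char × List Char)) (hp : PrevOK cd dc p prev) (r : List Char)
    (j : Nat) (hj : j < r.length) :
    PySem.List.pyGetD (mkUpTab prev dc r) (j : Int) ' ' = visUp cd dc p (j : Int) := by
  rw [mkUpTab_eq_map, PySem.List.pyGetD_natCast,
      PySem.List.getD_map_range _ _ _ _ (by simpa using hj)]
  rcases hp with ⟨hp0, rfl⟩ | ⟨hp0, pt, rfl, hpt⟩
  · subst hp0
    rfl
  · obtain ⟨q, rfl⟩ : ∃ q, p = q + 1 := ⟨p - 1, by omega⟩
    simp only [Nat.add_sub_cancel] at hpt ⊢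
    rw [visUp_succ]
    by_cases hc : (j : Int) + dc < 0 ∨ ((cd.getD q []).length : Int) ≤ (j : Int) + dc
    · rw [if_pos hc, if_pos hc]
    · rw [if_neg hc, if_neg hc]
      push Not at hc
      by_cases hch : PySem.List.pyGetD (cd.getD q []) ((j : Int) + dc) ' ' = '.'
      · rw [if_neg (by simpa using hch), if_neg (by simpa using hch)]
        exact hpt _ hc.1 hc.2
      · rw [if_pos (by simpa using hch), if_pos (by simpa using hch)]

lemma goUp_entry (cd : List (List Char)) (dc : Int) :
    ∀ (rs : List (List Char)) (p : Nat) (prev : Option (List Char × List Char)),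
      cd.drop p = rs → p + rs.length = cd.length → PrevOK cd dc p prev →
      ∀ (i : Nat), i < rs.length → ∀ (j : Nat), j < (rs.getD i []).length →
        PySem.List.pyGetD (PySem.List.pyGetD (goUp dc prev rs) (i : Int) []) (j : Int) ' ' =
          visUp cd dc (p + i) (j : Int) := by
  intro rs
  induction rs with
  | nil => intro p prev _ _ _ i hi _ _; simp at hi
  | cons r rs ih =>
    intro p prev hdrop hlen hp i hi j hj
    have hpR : p < cd.length := by simp at hlen; omega
    have hr : cd.getD p [] = r := by
      have := congrArg (fun l => l.getD 0 ([] : List Char)) hdrop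
      simpa [List.getD_eq_getElem?_getD, List.getElem?_drop, hpR] using this
    have htab : ∀ k : Nat, k < r.length →
        PySem.List.pyGetD (mkUpTab prev dc r) (k : Int) ' ' = visUp cd dc p (k : Int) :=
      fun k hk => mkUpTab_entry cd dc p prev hp r k hk
    cases i with
    | zero =>
      simp only [goUp, Nat.cast_zero, PySem.List.pyGetD_zero_cons, Nat.add_zero] at hj ⊢
      exact htab j (by simpa using hj)
    | succ i =>
      have hdrop' : cd.drop (p + 1) = rs := by
        have : cd.drop (p + 1) = (cd.drop p).drop 1 := by
          rw [List.drop_drop]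
        rw [this, hdrop]
        rfl
      have hp' : PrevOK cd dc (p + 1) (some (r, mkUpTab prev dc r)) := by
        right
        refine ⟨by omega, mkUpTab prev dc r, by rw [Nat.add_sub_cancel, hr], ?_⟩
        intro k hk0 hk1
        have hkn : k = ((k.toNat : Nat) : Int) := by omega
        rw [hkn]
        refine htab k.toNat ?_
        simp only [Nat.add_sub_cancel, hr] at hk1
        omega
      have hres := ih (p + 1) (some (r, mkUpTab prev dc r)) hdrop' (by simp at hlen ⊢; omega)
        hp' i (by simpa using hi) j (by simpa using hj)
      simp only [goUp]
      simp only [PySem.List.pyGetD_natCast] at hres ⊢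
      rw [List.getD_cons_succ, hres]
      congr 1
      omega

lemma goUp_length (dc : Int) :
    ∀ (prev : Option (List Char × List Char)) (rs : List (List Char)),
      (goUp dc prev rs).length = rs.length := by
  intro prev rs
  induction rs generalizing prev with
  | nil => rfl
  | cons r rs ih => simp [goUp, ih]

lemma sweepUp_entry (cd : List (List Char)) (dc : Int) (i : Nat) (hi : i < cd.length)
    (j : Nat) (hj : j < (cd.getD i []).length) :
    PySem.List.pyGetD (PySem.List.pyGetD (sweepUp cd dc) (i : Int) []) (j : Int) ' ' =
      visUp cd dc i (j : Int) := by
  unfold sweepUp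
  rw [sweepUp_eq_goUp]
  simp only [List.nil_append]
  have := goUp_entry cd dc cd 0 none (by simp) (by simp) (Or.inl ⟨rfl, rfl⟩) i hi j hj
  simpa using this

lemma sweepUp_length (cd : List (List Char)) (dc : Int) : (sweepUp cd dc).length = cd.length := by
  unfold sweepUp
  rw [sweepUp_eq_goUp]
  simp [goUp_length]

lemma sweepDown_entry (cd : List (List Char)) (dc : Int) (i : Nat) (hi : i < cd.length)
    (j : Nat) (hj : j < (cd.getD i []).length) :
    PySem.List.pyGetD (PySem.List.pyGetD (sweepDown cd dc) (i : Int) []) (j : Int) ' ' =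
      visUp cd.reverse dc (cd.length - 1 - i) (j : Int) := by
  unfold sweepDown
  have hlen : (sweepUp cd.reverse dc).length = cd.length := by
    rw [sweepUp_length]
    simp
  have h1 : PySem.List.pyGetD (sweepUp cd.reverse dc).reverse (i : Int) [] =
      PySem.List.pyGetD (sweepUp cd.reverse dc) ((cd.length - 1 - i : Nat) : Int) [] := by
    rw [PySem.List.pyGetD_natCast, PySem.List.pyGetD_natCast,
        getD_rev _ _ i (by rw [hlen]; omega)]
    congr 1
    omega
  have hrow : cd.reverse.getD (cd.length - 1 - i) [] = cd.getD i [] := by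
    have := getD_rev cd [] (cd.length - 1 - i) (by omega)
    rw [this]
    congr 1
    omega
  rw [h1]
  rw [sweepUp_entry cd.reverse dc (cd.length - 1 - i) (by simp; omega) j (by rw [hrow]; exact hj)]

lemma sweepLeft_eq_map (r : List Char) :
    sweepLeft r = (List.range r.length).map (fun j => visL r j) := by
  have key : ∀ m, m ≤ r.length →
      (PySem.List.pyRange 0 (m : Int) 1).foldl (fun tab j =>
        tab ++ [if j = 0 then '.'
                else if PySem.List.pyGetD r (j - 1) ' ' ≠ '.' then PySem.List.pyGetD r (j - 1) ' '
                else PySem.List.pyGetD tab (j - 1) ' ']) [] =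
        (List.range m).map (fun j => visL r j) := by
    intro m
    induction m with
    | zero => intro _; rfl
    | succ m ih =>
      intro hm
      have h1 : ((m + 1 : Nat) : Int) = (m : Int) + 1 := by push_cast; ring
      rw [h1, PySem.List.pyRange_one_succ_right (by positivity), List.foldl_append,
          ih (by omega), List.range_succ, List.map_append]
      simp only [List.foldl_cons, List.foldl_nil, List.map_cons, List.map_nil]
      congr 1
      cases m with
      | zero => simp [visL]
      | succ m =>
        have h2 : ((m + 1 : Nat) : Int) - 1 = (m : Int) := by push_cast; ring
        have hne : ¬ ((m + 1 : Nat) : Int) = 0 := by push_cast; omega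
        have hm' : m < (List.range (m + 1)).length := by simp
        simp only [hne, if_false, h2, PySem.List.pyGetD_natCast]
        have hget : (List.map (fun j => visL r j) (List.range (m + 1))).getD m ' ' = visL r m := by
          simp [List.getD_eq_getElem?_getD]
        rw [hget]
        have hlt : ¬ ((r.length : Int) ≤ (m : Int)) := by omega
        simp [visL, hlt]
  unfold sweepLeft
  exact key r.length le_rfl

-- ===== per-cell agreement and assembly =====

-- The value A's pass writes at cell (i, j) (and the value B computes there).
def cellA (cd : List (List Char)) (i j : Nat) : Char :=
  let c := PySem.List.pyGetD (PySem.List.pyGetD cd (i : Int) []) (j : Int) ' '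
  if c = '.' then c
  else
    let occupied : Int :=
      find_visible "up" cd i j + find_visible "down" cd i j +
      find_visible "left" cd i j + find_visible "right" cd i j +
      find_visible "up-left" cd i j + find_visible "up-right" cd i j +
      find_visible "down-left" cd i j + find_visible "down-right" cd i j
    if c = 'L' ∧ occupied = 0 then '#'
    else if c = '#' ∧ 5 ≤ occupied then 'L'
    else c

lemma count_eq_sum (v1 v2 v3 v4 v5 v6 v7 v8 : Char) :
    ((if v1 = '#' then (1:Int) else 0) + (if v2 = '#' then 1 else 0) +
     (if v3 = '#' then 1 else 0) + (if v4 = '#' then 1 else 0) +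
     (if v5 = '#' then 1 else 0) + (if v6 = '#' then 1 else 0) +
     (if v7 = '#' then 1 else 0) + (if v8 = '#' then 1 else 0)) =
      (([v1, v2, v3, v4, v5, v6, v7, v8].count '#' : Nat) : Int) := by
  simp [List.count_cons]
  split_ifs <;> simp_all

lemma max_row_le (cd : List (List Char)) (i : Nat) (hi : i < cd.length) :
    (cd.getD i []).length ≤ cd.foldr (fun r m => max r.length m) 0 := by
  induction cd generalizing i with
  | nil => simp at hi
  | cons r rs ih =>
    cases i with
    | zero => simp
    | succ i =>
      simp only [List.getD_cons_succ, List.foldr_cons]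
      exact le_trans (ih i (by simpa using hi)) (le_max_right _ _)

lemma cell_agree (cd : List (List Char)) (i j : Nat) (hi : i < cd.length)
    (hj : j < (cd.getD i []).length) :
    cellA cd i j =
      (let c := PySem.List.pyGetD (PySem.List.pyGetD cd (i : Int) []) (j : Int) ' '
       if c = '.' then c
       else
         let occ := ([PySem.List.pyGetD (PySem.List.pyGetD (sweepUp cd 0) (i : Int) []) (j : Int) ' ',
                      PySem.List.pyGetD (PySem.List.pyGetD (sweepDown cd 0) (i : Int) []) (j : Int) ' ',
                      PySem.List.pyGetD (PySem.List.pyGetD (cd.map sweepLeft) (i : Int) []) (j : Int) ' ',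
                      PySem.List.pyGetD (PySem.List.pyGetD (cd.map (fun r => (sweepLeft r.reverse).reverse)) (i : Int) []) (j : Int) ' ',
                      PySem.List.pyGetD (PySem.List.pyGetD (sweepUp cd (-1)) (i : Int) []) (j : Int) ' ',
                      PySem.List.pyGetD (PySem.List.pyGetD (sweepUp cd 1) (i : Int) []) (j : Int) ' ',
                      PySem.List.pyGetD (PySem.List.pyGetD (sweepDown cd (-1)) (i : Int) []) (j : Int) ' ',
                      PySem.List.pyGetD (PySem.List.pyGetD (sweepDown cd 1) (i : Int) []) (j : Int) ' '].count '#')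
         if c = 'L' ∧ occ = 0 then '#'
         else if c = '#' ∧ 5 ≤ occ then 'L'
         else c) := by
  have hM := max_row_le cd i hi
  have hF : fvFuel cd = cd.length + cd.foldr (fun r m => max r.length m) 0 + 2 := rfl
  have hFi : i + 1 ≤ fvFuel cd := by rw [hF]; omega
  have hFd : (cd.length - 1 - i) + 1 ≤ fvFuel cd := by rw [hF]; omega
  have hFl : j + 1 ≤ fvFuel cd := by rw [hF]; omega
  have hFr : (cd.getD i []).length - j ≤ fvFuel cd := by rw [hF]; omega
  have hidx : (cd.length : Int) - 1 - (i : Int) = ((cd.length - 1 - i : Nat) : Int) := by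
    omega
  have hrevlen : cd.length - 1 - i < cd.reverse.length := by simp; omega
  have hrevrow : cd.reverse.getD (cd.length - 1 - i) [] = cd.getD i [] := by
    rw [getD_rev cd [] _ (by omega)]
    congr 1
    omega
  have hdn : ∀ dc : Int, rayLoop (fvFuel cd) cd 1 dc (i : Int) (j : Int) '.' =
      visUp cd.reverse dc (cd.length - 1 - i) (j : Int) := by
    intro dc
    rw [ray_rev cd dc, hidx,
        ray_up_eq_visUp cd.reverse dc (cd.length - 1 - i) (fvFuel cd) (j : Int)
          (by simpa using hrevlen) (by omega) hFd]
  have hvr : visR (cd.getD i []) j =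
      visL (cd.getD i []).reverse ((cd.getD i []).length - 1 - j) :=
    visR_eq_visL_rev (cd.getD i []) ((cd.getD i []).length - j - 1) j hj (by omega)
  have hmapL : PySem.List.pyGetD (PySem.List.pyGetD (cd.map sweepLeft) (i : Int) []) (j : Int) ' ' =
      visL (cd.getD i []) j := by
    have h1 : PySem.List.pyGetD (cd.map sweepLeft) (i : Int) [] = sweepLeft (cd.getD i []) := by
      rw [PySem.List.pyGetD_natCast, List.getD_eq_getElem?_getD, List.getElem?_map,
          List.getElem?_eq_getElem hi]
      simp [List.getD_eq_getElem?_getD, List.getElem?_eq_getElem hi]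
    rw [h1, sweepLeft_eq_map, PySem.List.pyGetD_natCast,
        PySem.List.getD_map_range _ _ _ _ hj]
  have hmapR : PySem.List.pyGetD (PySem.List.pyGetD
        (cd.map (fun r => (sweepLeft r.reverse).reverse)) (i : Int) []) (j : Int) ' ' =
      visL (cd.getD i []).reverse ((cd.getD i []).length - 1 - j) := by
    have h1 : PySem.List.pyGetD (cd.map (fun r => (sweepLeft r.reverse).reverse)) (i : Int) [] =
        (sweepLeft (cd.getD i []).reverse).reverse := by
      rw [PySem.List.pyGetD_natCast, List.getD_eq_getElem?_getD, List.getElem?_map,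
          List.getElem?_eq_getElem hi]
      simp [List.getD_eq_getElem?_getD, List.getElem?_eq_getElem hi]
    have hlen : (sweepLeft (cd.getD i []).reverse).length = (cd.getD i []).length := by
      rw [sweepLeft_eq_map]
      simp
    rw [h1, PySem.List.pyGetD_natCast, getD_rev _ _ j (by rw [hlen]; exact hj), hlen,
        sweepLeft_eq_map]
    rw [PySem.List.getD_map_range _ _ _ _ (by simp only [List.length_reverse]; omega)]
  unfold cellA find_visible
  rw [fvLoop_up, fvLoop_down, fvLoop_left, fvLoop_right, fvLoop_ul, fvLoop_ur, fvLoop_dl,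
      fvLoop_dr,
      ray_up_eq_visUp cd 0 i (fvFuel cd) (j : Int) hi (by omega) hFi,
      ray_up_eq_visUp cd (-1) i (fvFuel cd) (j : Int) hi (by omega) hFi,
      ray_up_eq_visUp cd 1 i (fvFuel cd) (j : Int) hi (by omega) hFi,
      hdn 0, hdn (-1), hdn 1,
      ray_left_eq_visL cd j (fvFuel cd) i hi hFl,
      ray_right_eq_visR cd (fvFuel cd) j i hi hj hFr, hvr,
      sweepUp_entry cd 0 i hi j hj, sweepUp_entry cd (-1) i hi j hj,
      sweepUp_entry cd 1 i hi j hj,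
      sweepDown_entry cd 0 i hi j hj, sweepDown_entry cd (-1) i hi j hj,
      sweepDown_entry cd 1 i hi j hj, hmapL, hmapR, count_eq_sum]
  simp only [Nat.cast_eq_zero, Nat.ofNat_le_cast]

def rowA (cd : List (List Char)) (i : Nat) : List Char :=
  (List.range (cd.getD i []).length).map (fun j => cellA cd i j)

lemma map_getD_range_self {α : Type} (r : List α) (d : α) :
    (List.range r.length).map (fun t => r.getD t d) = r := by
  apply List.ext_getElem (by simp)
  intro t h1 h2
  simp [List.getD_eq_getElem?_getD, List.getElem?_eq_getElem h2]

lemma pref_set (cd : List (List Char)) (Kv : Nat) (n m : Nat) (hm : m < n) (r : List Char)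
    (v : Char) (hv : v = cellA cd Kv m) :
    (((List.range n).map (fun t => if t < m then cellA cd Kv t else r.getD t ' ')).set m v) =
      (List.range n).map (fun t => if t < m + 1 then cellA cd Kv t else r.getD t ' ') := by
  subst hv
  apply List.ext_getElem (by simp)
  intro t h1 h2
  simp only [List.getElem_set, List.getElem_map, List.getElem_range]
  by_cases ht : t = m
  · subst ht
    simp
  · rw [if_neg (by omega)]
    by_cases h3 : t < m
    · rw [if_pos h3, if_pos (by omega)]
    · rw [if_neg h3, if_neg (by omega)]

lemma pref_stay (cd : List (List Char)) (Kv : Nat) (n m : Nat) (r : List Char)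
    (hgm : cellA cd Kv m = r.getD m ' ') :
    (List.range n).map (fun t => if t < m then cellA cd Kv t else r.getD t ' ') =
      (List.range n).map (fun t => if t < m + 1 then cellA cd Kv t else r.getD t ' ') := by
  apply List.map_congr_left
  intro t _
  by_cases ht : t = m
  · subst ht
    simp [hgm]
  · by_cases h3 : t < m
    · rw [if_pos h3, if_pos (by omega)]
    · rw [if_neg h3, if_neg (by omega)]

lemma innerA_key (cd : List (List Char)) (K : Nat) (hK : K < cd.length) :
    ∀ (m : Nat), m ≤ (PySem.List.pyGetD cd (K : Int) []).length →
    ∀ (nd : List (List Char)), nd.length = cd.length → nd.getD K [] = cd.getD K [] →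
    (List.range m).foldl
      (fun nd (k : Nat) =>
        let c := PySem.List.pyGetD (PySem.List.pyGetD cd (K : Int) []) (k : Int) ' '
        if c = '.' then nd
        else
          let occupied : Int :=
            find_visible "up" cd (K : Int) (k : Int) + find_visible "down" cd (K : Int) (k : Int) +
            find_visible "left" cd (K : Int) (k : Int) + find_visible "right" cd (K : Int) (k : Int) +
            find_visible "up-left" cd (K : Int) (k : Int) + find_visible "up-right" cd (K : Int) (k : Int) +
            find_visible "down-left" cd (K : Int) (k : Int) + find_visible "down-right" cd (K : Int) (k : Int)
          let nd :=
            if c = 'L' ∧ occupied = 0 then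
              PySem.List.pySetD nd (K : Int)
                (PySem.List.slice (PySem.List.pyGetD nd (K : Int) []) none (some (k : Int)) ++ ['#'] ++
                 PySem.List.slice (PySem.List.pyGetD nd (K : Int) []) (some ((k : Int) + 1)) none)
            else nd
          if c = '#' ∧ 5 ≤ occupied then
            PySem.List.pySetD nd (K : Int)
              (PySem.List.slice (PySem.List.pyGetD nd (K : Int) []) none (some (k : Int)) ++ ['L'] ++
               PySem.List.slice (PySem.List.pyGetD nd (K : Int) []) (some ((k : Int) + 1)) none)
          else nd) nd =
      nd.set K ((List.range (PySem.List.pyGetD cd (K : Int) []).length).map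
        (fun t => if t < m then cellA cd K t else (cd.getD K []).getD t ' ')) := by
  intro m
  induction m with
  | zero =>
    intro _ nd hndlen hrow
    simp only [List.range_zero, List.foldl_nil]
    have h0 : (List.range (PySem.List.pyGetD cd (K : Int) []).length).map
        (fun t => if t < 0 then cellA cd K t else (cd.getD K []).getD t ' ') = cd.getD K [] := by
      rw [PySem.List.pyGetD_natCast]
      rw [List.map_congr_left (fun t _ => by rw [if_neg (by omega)])]
      exact map_getD_range_self (cd.getD K []) ' '
    rw [h0, ← hrow, List.getD_eq_getElem nd [] (by omega), List.set_getElem_self]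
  | succ m ih =>
    intro hm nd hndlen hrow
    rw [List.range_succ, List.foldl_append, ih (by omega) nd hndlen hrow, List.foldl_cons,
        List.foldl_nil]
    simp only [PySem.List.pyGetD_natCast]
    have hmn : m < (cd.getD K []).length := by
      rw [PySem.List.pyGetD_natCast] at hm
      omega
    set r := cd.getD K [] with hrdef
    set n := r.length with hn
    set pm := (List.range n).map (fun t => if t < m then cellA cd K t else r.getD t ' ') with hpm
    set s := nd.set K pm with hs
    have hpmlen : pm.length = n := by rw [hpm]; simp
    have hread : s.getD K [] = pm := by
      rw [hs, List.getD_eq_getElem _ [] (by rw [List.length_set]; omega),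
          List.getElem_set_self (by simp only [List.length_set]; omega)]
    have hsplice : ∀ v : Char,
        PySem.List.slice (s.getD K []) none (some (m : Int)) ++ [v] ++
          PySem.List.slice (s.getD K []) (some ((m : Int) + 1)) none = pm.set m v := by
      intro v
      rw [hread, PySem.List.slice_to_natCast,
          show ((m : Int) + 1) = ((m + 1 : Nat) : Int) by push_cast; ring,
          PySem.List.slice_from_natCast, List.set_eq_take_cons_drop v (by omega)]
      simp
    have hset : ∀ v : Char, v = cellA cd K m →
        PySem.List.pySetD s (K : Int)
            (PySem.List.slice (s.getD K []) none (some (m : Int)) ++ [v] ++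
             PySem.List.slice (s.getD K []) (some ((m : Int) + 1)) none) =
          nd.set K ((List.range n).map
            (fun t => if t < m + 1 then cellA cd K t else r.getD t ' ')) := by
      intro v hv
      rw [hsplice v, PySem.List.pySetD_of_nonneg s _ (by omega), Int.toNat_natCast, hs,
          List.set_set, hpm, pref_set cd K n m hmn r v hv]
    have hcell : cellA cd K m =
        (if r.getD m ' ' = '.' then r.getD m ' '
         else
           let occupied : Int :=
             find_visible "up" cd (K : Int) (m : Int) + find_visible "down" cd (K : Int) (m : Int) +
             find_visible "left" cd (K : Int) (m : Int) + find_visible "right" cd (K : Int) (m : Int) +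
             find_visible "up-left" cd (K : Int) (m : Int) + find_visible "up-right" cd (K : Int) (m : Int) +
             find_visible "down-left" cd (K : Int) (m : Int) + find_visible "down-right" cd (K : Int) (m : Int)
           if r.getD m ' ' = 'L' ∧ occupied = 0 then '#'
           else if r.getD m ' ' = '#' ∧ 5 ≤ occupied then 'L'
           else r.getD m ' ') := by
      unfold cellA
      rw [PySem.List.pyGetD_natCast, PySem.List.pyGetD_natCast, ← hrdef]
    by_cases h1 : r.getD m ' ' = '.'
    · rw [if_pos h1, hs, hpm, pref_stay cd K n m r (by rw [hcell, if_pos h1])]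
    · rw [if_neg h1]
      by_cases h2 : r.getD m ' ' = 'L' ∧
          (find_visible "up" cd (K : Int) (m : Int) + find_visible "down" cd (K : Int) (m : Int) +
           find_visible "left" cd (K : Int) (m : Int) + find_visible "right" cd (K : Int) (m : Int) +
           find_visible "up-left" cd (K : Int) (m : Int) + find_visible "up-right" cd (K : Int) (m : Int) +
           find_visible "down-left" cd (K : Int) (m : Int) + find_visible "down-right" cd (K : Int) (m : Int)) = 0
      · rw [if_pos h2, if_neg (by rintro ⟨h3, _⟩; rw [h2.1] at h3; exact absurd h3 (by decide))]
        exact hset '#' (by rw [hcell, if_neg h1, if_pos h2])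
      · rw [if_neg h2]
        by_cases h3 : r.getD m ' ' = '#' ∧ 5 ≤
            (find_visible "up" cd (K : Int) (m : Int) + find_visible "down" cd (K : Int) (m : Int) +
             find_visible "left" cd (K : Int) (m : Int) + find_visible "right" cd (K : Int) (m : Int) +
             find_visible "up-left" cd (K : Int) (m : Int) + find_visible "up-right" cd (K : Int) (m : Int) +
             find_visible "down-left" cd (K : Int) (m : Int) + find_visible "down-right" cd (K : Int) (m : Int))
        · rw [if_pos h3]
          exact hset 'L' (by rw [hcell, if_neg h1, if_neg h2, if_pos h3])
        · rw [if_neg h3, hs, hpm,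
              pref_stay cd K n m r (by rw [hcell, if_neg h1, if_neg h2, if_neg h3])]

lemma patch_succ (cd : List (List Char)) (K : Nat) (hK : K < cd.length) :
    ((List.range cd.length).map (fun i => if i < K then rowA cd i else cd.getD i [])).set K
        (rowA cd K) =
      (List.range cd.length).map (fun i => if i < K + 1 then rowA cd i else cd.getD i []) := by
  apply List.ext_getElem (by simp)
  intro t h1 h2
  simp only [List.getElem_set, List.getElem_map, List.getElem_range]
  by_cases ht : t = K
  · subst ht
    simp
  · rw [if_neg (by omega)]
    by_cases h3 : t < K
    · rw [if_pos h3, if_pos (by omega)]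
    · rw [if_neg h3, if_neg (by omega)]

lemma outerA_key (cd : List (List Char)) :
    ∀ (KK : Nat), KK ≤ cd.length →
    (List.range KK).foldl
      (fun nd (k : Nat) =>
        (PySem.List.pyRange 0 (((PySem.List.pyGetD cd (k : Int) []).length : Int)) 1).foldl
          (fun nd j =>
            let c := PySem.List.pyGetD (PySem.List.pyGetD cd (k : Int) []) j ' '
            if c = '.' then nd
            else
              let occupied : Int :=
                find_visible "up" cd (k : Int) j + find_visible "down" cd (k : Int) j +
                find_visible "left" cd (k : Int) j + find_visible "right" cd (k : Int) j +
                find_visible "up-left" cd (k : Int) j + find_visible "up-right" cd (k : Int) j +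
                find_visible "down-left" cd (k : Int) j + find_visible "down-right" cd (k : Int) j
              let nd :=
                if c = 'L' ∧ occupied = 0 then
                  PySem.List.pySetD nd (k : Int)
                    (PySem.List.slice (PySem.List.pyGetD nd (k : Int) []) none (some j) ++ ['#'] ++
                     PySem.List.slice (PySem.List.pyGetD nd (k : Int) []) (some (j + 1)) none)
                else nd
              if c = '#' ∧ 5 ≤ occupied then
                PySem.List.pySetD nd (k : Int)
                  (PySem.List.slice (PySem.List.pyGetD nd (k : Int) []) none (some j) ++ ['L'] ++
                   PySem.List.slice (PySem.List.pyGetD nd (k : Int) []) (some (j + 1)) none)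
              else nd) nd) cd =
      (List.range cd.length).map (fun i => if i < KK then rowA cd i else cd.getD i []) := by
  intro KK
  induction KK with
  | zero =>
    intro _
    simp only [List.range_zero, List.foldl_nil, Nat.not_lt_zero, if_false]
    exact (map_getD_range_self cd []).symm
  | succ K ihK =>
    intro hK
    rw [List.range_succ, List.foldl_append, ihK (by omega), List.foldl_cons, List.foldl_nil]
    have hKlt : K < cd.length := by omega
    set pk := (List.range cd.length).map (fun i => if i < K then rowA cd i else cd.getD i [])
      with hpk
    have hlen : pk.length = cd.length := by rw [hpk]; simp
    have hrow : pk.getD K [] = cd.getD K [] := by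
      rw [hpk, List.getD_eq_getElem _ [] (by simp; omega)]
      simp only [List.getElem_map, List.getElem_range]
      rw [if_neg (by omega), List.getD_eq_getElem _ [] (by omega)]
    have hinner := innerA_key cd K hKlt (PySem.List.pyGetD cd (K : Int) []).length le_rfl pk hlen
      hrow
    simp only [PySem.List.pyRange_one, Int.sub_zero, Int.toNat_natCast, List.foldl_map,
      zero_add] at hinner ⊢
    rw [hinner, ← patch_succ cd K hKlt]
    congr 1
    unfold rowA
    rw [PySem.List.pyGetD_natCast]
    apply List.map_congr_left
    intro t ht
    rw [if_pos (by simpa using ht)]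

lemma updateA_eq (current_data : List String) :
    update_seats current_data =
      (List.range (current_data.map String.toList).length).map (fun i =>
        String.ofList (rowA (current_data.map String.toList) i)) := by
  unfold update_seats
  set cd := current_data.map String.toList with hcd
  have houter := outerA_key cd cd.length le_rfl
  simp only [PySem.List.pyRange_one, Int.sub_zero, Int.toNat_natCast, List.foldl_map,
    zero_add] at houter ⊢
  rw [houter]
  rw [List.map_map]
  apply List.map_congr_left
  intro t ht
  simp only [Function.comp_apply]
  rw [if_pos (by simpa using ht)]

lemma updateB_eq (current_data : List String) :
    update_seats_alt current_data =
      (List.range (current_data.map String.toList).length).map (fun i =>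
        String.ofList (rowA (current_data.map String.toList) i)) := by
  unfold update_seats_alt
  set cd := current_data.map String.toList with hcd
  simp only [PySem.List.foldl_append_singleton_eq_map, List.nil_append, PySem.List.pyRange_one,
    Int.sub_zero, Int.toNat_natCast, List.map_map, zero_add]
  apply List.map_congr_left
  intro i hi
  simp only [Function.comp_apply]
  congr 1
  unfold rowA
  have hi' : i < cd.length := by simpa using hi
  rw [show (PySem.List.pyGetD cd (i : Int) []).length = (cd.getD i []).length by
    rw [PySem.List.pyGetD_natCast]]
  apply List.map_congr_left
  intro j hj
  have hj' : j < (cd.getD i []).length := by simpa using hj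
  exact (cell_agree cd i j hi' hj').symm

-- ===== VERDICT (by name: the statement is the Claim_ definition above) =====
theorem update_seats_spec : Claim_equal_update_seats := by
  intro current_data _
  unfold Spec_update_seats
  rw [updateA_eq, updateB_eq]
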